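-- pv_equiv track=rewrite | github.com/loker86/cs61a | exam/exam_prep01.py | sandwich
-- ===== SOURCE A (Python) =====
-- def sandwich(n):
--     """Return True if n contains a sandwich and False
--     otherwise
--     >>> sandwich(416263) # 626
--     True
--     >>> sandwich(5050) # 505 or 050
--     True
--     >>> sandwich(4441) # 444
--     True
--     >>> sandwich(1231)
--     False
--     >>> sandwich(55)
--     False
--     >>> sandwich(4456)
--     False
--     """
--     tens, ones = (n // 10) % 10, n % 10
--     n = n // 100
--     while n:
--         if n % 10 == ones:
--             return True
--         else:
--             tens, ones = n % 10, tens
--             n = n // 10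
--     return False
-- ===== SOURCE B (Python) =====
-- def sandwich(n):
--     d = []
--     m = n
--     while m:
--         d.append(m % 10)
--         m //= 10
--     return any(d[i] == d[i + 2] for i in range(len(d) - 2))
-- ===== Notes on version B (the rewrite author's own statement) =====
-- stated objective: simpler
-- what changed: A's single interleaved pass keeping a two-register sliding window (tens, ones) is replaced by two plain passes: materialize the digit list least-significant-first, then scan for any pair of digits two positions apart that are equal.
-- outside the precondition, e.g. on sandwich(-123): A returns True, B does not finish within the time limit
import Mathlib
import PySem

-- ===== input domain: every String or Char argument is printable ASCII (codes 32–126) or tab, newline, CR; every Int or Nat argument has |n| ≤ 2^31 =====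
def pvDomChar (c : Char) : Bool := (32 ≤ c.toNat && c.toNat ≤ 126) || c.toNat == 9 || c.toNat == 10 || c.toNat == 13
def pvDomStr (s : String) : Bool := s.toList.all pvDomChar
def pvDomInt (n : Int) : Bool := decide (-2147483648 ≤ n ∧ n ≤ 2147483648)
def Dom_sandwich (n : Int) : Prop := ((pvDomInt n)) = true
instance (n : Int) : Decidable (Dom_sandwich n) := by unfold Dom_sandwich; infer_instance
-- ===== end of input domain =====

-- B replaces A's interleaved sliding-window pass (registers tens/ones) by two plain passes:
-- materialize the digit list, then scan for equal digits two apart (objective: simpler).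

-- ===== PORT A =====
-- the while-loop of A; fuel only makes the same recursion total (Pre_ ensures enough fuel)
def sandwichLoopA : Nat → Int → Int → Int → Bool
  | 0, _, _, _ => false
  | fuel + 1, n, tens, ones =>
    if n ≠ 0 then
      if PySem.Int.mod n 10 = ones then true
      else sandwichLoopA fuel (PySem.Int.floordiv n 10) (PySem.Int.mod n 10) tens
    else false

def sandwich (n : Int) : Bool :=
  let tens := PySem.Int.mod (PySem.Int.floordiv n 10) 10
  let ones := PySem.Int.mod n 10
  sandwichLoopA (n.natAbs + 1) (PySem.Int.floordiv n 100) tens ones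

-- ===== PORT B =====
-- the digit-materializing while-loop of Source B; fuel only makes the same recursion total
def digitsB : Nat → Int → List Int
  | 0, _ => []
  | fuel + 1, m =>
    if m ≠ 0 then PySem.Int.mod m 10 :: digitsB fuel (PySem.Int.floordiv m 10) else []

def sandwich_alt (n : Int) : Bool :=
  let d := digitsB (n.natAbs + 1) n
  -- d[i] == d[i+2] : i and i+2 are in range for every i in range(len(d)-2), so getD is exact
  (List.range (d.length - 2)).any (fun i => d.getD i 0 == d.getD (i + 2) 0)

-- ===== PRECONDITION & SPEC =====
-- Pre_ excludes negative n, where A's unconditional True is an artefact of Python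
-- floor-division's infinite trailing-9 digit stream and B's digit-materializing loop
-- does not terminate (B returns no value there).
def Pre_sandwich (n : Int) : Prop := 0 ≤ n
instance (n : Int) : Decidable (Pre_sandwich n) := by unfold Pre_sandwich; infer_instance
def pvWitness_sandwich : Int := (5050)

def Spec_sandwich (n : Int) (out : Bool) : Prop := out = sandwich_alt n
instance (n : Int) (out : Bool) : Decidable (Spec_sandwich n out) := by unfold Spec_sandwich; infer_instance

-- ===== CLAIM (what is proved, stated in full; the proofs are below) =====
def Claim_equal_sandwich : Prop := ∀ (n : Int), Dom_sandwich n → Pre_sandwich n → Spec_sandwich n (sandwich n)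

-- ===== LEMMAS AND PROOFS =====

-- clean digit list of a nonnegative integer, least-significant first (proof helper)
def digBig (m : Int) : List Int :=
  if h : 0 < m then m % 10 :: digBig (m / 10) else []
termination_by m.toNat
decreasing_by
  have h1 : 0 ≤ m / 10 := Int.ediv_nonneg (le_of_lt h) (by norm_num)
  have h2 : m / 10 < m := by omega
  omega

-- "some pair of entries two apart is equal", as structural recursion (proof helper)
def sand2 : List Int → Bool
  | a :: b :: c :: rest => (a == c) || sand2 (b :: c :: rest)
  | _ => false

theorem loopA_eq_sand2 (fuel : Nat) (m t o : Int) :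
    sandwichLoopA fuel m t o = sand2 (o :: t :: digitsB fuel m) := by
  induction fuel generalizing m t o with
  | zero => simp [sandwichLoopA, digitsB, sand2]
  | succ fuel ih =>
    by_cases h : m = 0
    · simp [sandwichLoopA, digitsB, h, sand2]
    · rw [sandwichLoopA, digitsB, if_pos h, if_pos h, sand2, ih]
      by_cases he : PySem.Int.mod m 10 = o
      · subst he; simp
      · rw [if_neg he]
        have hb : (o == PySem.Int.mod m 10) = false :=
          beq_eq_false_iff_ne.mpr (fun hc => he hc.symm)
        rw [hb, Bool.false_or]

theorem digitsB_eq_digBig (fuel : Nat) (m : Int) (h0 : 0 ≤ m) (hf : m.natAbs < fuel) :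
    digitsB fuel m = digBig m := by
  induction fuel generalizing m with
  | zero => omega
  | succ fuel ih =>
    by_cases h : m = 0
    · simp [digitsB, h, digBig]
    · have hpos : 0 < m := by omega
      rw [digitsB, if_pos h, digBig, dif_pos hpos,
        PySem.Int.mod_eq_emod_of_pos (show (0:Int) < 10 by norm_num),
        PySem.Int.floordiv_eq_ediv_of_pos (show (0:Int) < 10 by norm_num)]
      congr 1
      have h1 : 0 ≤ m / 10 := Int.ediv_nonneg h0 (by norm_num)
      have h2 : m / 10 < m := by omega
      exact ih (m / 10) h1 (by omega)

theorem anyScan_eq_sand2 (l : List Int) :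
    (List.range (l.length - 2)).any (fun i => l.getD i 0 == l.getD (i + 2) 0) = sand2 l := by
  match l with
  | [] => simp [sand2]
  | [a] => simp [sand2]
  | [a, b] => simp [sand2]
  | a :: b :: c :: rest =>
    have hlen : (a :: b :: c :: rest).length - 2 = rest.length + 1 := by
      simp
    rw [hlen, List.range_succ_eq_map]
    simp only [List.any_cons, List.any_map]
    have htail := anyScan_eq_sand2 (b :: c :: rest)
    have hlen' : (b :: c :: rest).length - 2 = rest.length := by simp
    rw [hlen'] at htail
    rw [sand2, ← htail]
    congr 1

-- the gluing step: prepending the two lowest digits to digBig (n / 100) gives digBig n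
theorem sand2_glue (n : Int) (h0 : 0 ≤ n) :
    sand2 (n % 10 :: n / 10 % 10 :: digBig (n / 100)) = sand2 (digBig n) := by
  by_cases h10 : 10 ≤ n
  · have hd1 : 0 < n := by omega
    have hd2 : 0 < n / 10 := by omega
    have e1 : digBig n = n % 10 :: digBig (n / 10) := by rw [digBig, dif_pos hd1]
    have e2 : digBig (n / 10) = n / 10 % 10 :: digBig (n / 10 / 10) := by
      rw [digBig, dif_pos hd2]
    have e3 : n / 10 / 10 = n / 100 := by omega
    rw [e1, e2, e3]
  · -- 0 ≤ n < 10 : both sides are false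
    have h100 : n / 100 = 0 := by omega
    rw [h100]
    have hz : digBig 0 = [] := by rw [digBig]; simp
    rw [hz]
    by_cases h : n = 0
    · subst h; rw [hz]; rfl
    · have hpos : 0 < n := by omega
      have h10' : n / 10 = 0 := by omega
      rw [digBig, dif_pos hpos, h10', hz]
      rfl

theorem sandwich_eq_alt (n : Int) (h0 : 0 ≤ n) : sandwich n = sandwich_alt n := by
  unfold sandwich sandwich_alt
  rw [loopA_eq_sand2, anyScan_eq_sand2]
  simp only [PySem.Int.mod_eq_emod_of_pos (show (0:Int) < 10 by norm_num),
    PySem.Int.floordiv_eq_ediv_of_pos (show (0:Int) < 10 by norm_num),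
    PySem.Int.floordiv_eq_ediv_of_pos (show (0:Int) < 100 by norm_num)]
  have hn100 : 0 ≤ n / 100 := Int.ediv_nonneg h0 (by norm_num)
  have hlt : (n / 100).natAbs < n.natAbs + 1 := by
    have : n / 100 ≤ n := by omega
    omega
  rw [digitsB_eq_digBig _ _ hn100 hlt, digitsB_eq_digBig _ _ h0 (by omega)]
  exact sand2_glue n h0

-- ===== VERDICT (by name: the statement is the Claim_ definition above) =====
theorem sandwich_spec : Claim_equal_sandwich := by
  intro n _ hpre
  unfold Spec_sandwich
  exact sandwich_eq_alt n hpre
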